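-- pv_equiv track=rewrite | github.com/shaileshp51/sampdi3dv2 | utils/dna.py | mutation_type_dna
-- ===== SOURCE A (Python) =====
-- def mutation_type_dna(basepairs, wild, mutation):
--     """
--     Determines the 1-indexed position of a specific wild-to-mutation pair
--     transition within the given DNA basepair sequence.
--
--     Parameters:
--         basepairs (tuple): A collection of DNA basepair strings
--                            (e.g., "AA", "AT", "AG", "AC", ...).
--         wild (str): The wild type basepair (e.g., "AT").
--         mutation (str): The mutated basepair (e.g., "TG").
--
--     Returns:
--         int: The 1-indexed position of the wild-to-mutation pair transition
--              in all possible combinations, or 0 if not found.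
--     """
--     position = 0  # Tracks the position across all valid (wild, mutation) pairs.
--
--     for i in basepairs:
--         for j in basepairs:
--             if i != j:  # Only consider valid transitions where i != j
--                 position += 1
--                 if i == wild and j == mutation:
--                     return position  # Return position when match is found.
--
--     return 0  # Return 0 if no valid transition is found.
-- ===== SOURCE B (Python) =====
-- def mutation_type_dna(basepairs, wild, mutation):
--     # Closed-form counting: one pass for counts, then prefix sums. O(n) instead of O(n^2).
--     if wild == mutation or wild not in basepairs or mutation not in basepairs:
--         return 0
--     n = len(basepairs)
--     counts = {}
--     for bp in basepairs:
--         counts[bp] = counts.get(bp, 0) + 1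
--     a = basepairs.index(wild)
--     m = basepairs.index(mutation)
--     # full inner loops before the wild row, then the partial row up to the mutation
--     pos = sum(n - counts[bp] for bp in basepairs[:a])
--     pos += sum(1 for j in basepairs[:m] if j != wild)
--     return pos + 1
-- ===== Notes on version B (the rewrite author's own statement) =====
-- stated objective: faster
-- what changed: Replaces the quadratic nested scan over all ordered basepair pairs by a single counting pass (a dict of occurrence counts plus the first indices of wild and mutation) and a closed-form prefix-sum formula for the 1-indexed position.
import Mathlib
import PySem

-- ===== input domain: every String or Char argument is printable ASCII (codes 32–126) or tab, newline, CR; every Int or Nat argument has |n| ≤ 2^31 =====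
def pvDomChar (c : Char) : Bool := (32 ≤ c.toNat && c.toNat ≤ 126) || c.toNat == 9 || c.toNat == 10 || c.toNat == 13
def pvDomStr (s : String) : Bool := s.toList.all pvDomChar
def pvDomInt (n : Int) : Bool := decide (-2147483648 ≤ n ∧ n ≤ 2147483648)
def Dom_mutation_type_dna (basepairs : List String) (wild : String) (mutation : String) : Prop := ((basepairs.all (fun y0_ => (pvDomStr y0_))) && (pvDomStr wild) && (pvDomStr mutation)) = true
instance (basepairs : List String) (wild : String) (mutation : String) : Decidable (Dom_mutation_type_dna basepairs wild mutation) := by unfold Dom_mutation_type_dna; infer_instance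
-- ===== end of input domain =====

-- B replaces A's nested quadratic scan by one counting pass plus a closed-form prefix formula; same return value on every input.

-- ===== PORT A =====
-- inner 'for j in basepairs' loop: (some position) on the early return, else (none, updated position)
def pvInnerA (i wild mutation : String) (bps : List String) (pos : Int) : Option Int × Int :=
  match bps with
  | [] => (none, pos)
  | j :: rest =>
    if i ≠ j then
      if i = wild ∧ j = mutation then (some (pos + 1), pos + 1)
      else pvInnerA i wild mutation rest (pos + 1)
    else pvInnerA i wild mutation rest pos

-- outer 'for i in basepairs' loop
def pvOuterA (wild mutation : String) (bps outer : List String) (pos : Int) : Int :=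
  match outer with
  | [] => 0
  | i :: rest =>
    match pvInnerA i wild mutation bps pos with
    | (some r, _) => r
    | (none, pos') => pvOuterA wild mutation bps rest pos'

def mutation_type_dna (basepairs : List String) (wild : String) (mutation : String) : Int :=
  pvOuterA wild mutation basepairs basepairs 0

-- ===== PORT B =====
-- counts[bp] is read with default 0: exact here, since the guard guarantees every key read is present
def mutation_type_dna_alt (basepairs : List String) (wild : String) (mutation : String) : Int :=
  if wild = mutation ∨ wild ∉ basepairs ∨ mutation ∉ basepairs then 0
  else
    let n : Int := basepairs.length
    let counts : PySem.Dict String Int :=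
      basepairs.foldl (fun d bp => d.insert bp (d.getD bp 0 + 1)) PySem.Dict.empty
    let a : Int := ((PySem.List.index? basepairs wild).getD 0 : Nat)
    let m : Int := ((PySem.List.index? basepairs mutation).getD 0 : Nat)
    let pos : Int := ((PySem.List.slice basepairs none (some a)).map (fun bp => n - counts.getD bp 0)).sum
    let pos : Int := pos + ((PySem.List.slice basepairs none (some m)).countP (fun j => j != wild) : Nat)
    pos + 1

-- ===== PRECONDITION & SPEC =====
def Spec_mutation_type_dna (basepairs : List String) (wild : String) (mutation : String) (out : Int) : Prop := out = mutation_type_dna_alt basepairs wild mutation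
instance (basepairs : List String) (wild : String) (mutation : String) (out : Int) : Decidable (Spec_mutation_type_dna basepairs wild mutation out) := by unfold Spec_mutation_type_dna; infer_instance

-- ===== CLAIM (what is proved, stated in full; the proofs are below) =====
def Claim_equal_mutation_type_dna : Prop := ∀ (basepairs : List String) (wild : String) (mutation : String), Dom_mutation_type_dna basepairs wild mutation → Spec_mutation_type_dna basepairs wild mutation (mutation_type_dna basepairs wild mutation)

-- ===== LEMMAS AND PROOFS =====

-- A's inner loop finds nothing when i ≠ wild, or mutation = i, or mutation is absent
lemma pvInnerA_none (i wild mutation : String) (bps : List String) (pos : Int)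
    (h : i ≠ wild ∨ mutation = i ∨ mutation ∉ bps) :
    pvInnerA i wild mutation bps pos = (none, pos + (bps.countP (fun j => j != i) : Nat)) := by
  induction bps generalizing pos with
  | nil => simp [pvInnerA]
  | cons j rest ih =>
    have h' : i ≠ wild ∨ mutation = i ∨ mutation ∉ rest := by
      rcases h with h | h | h
      · exact Or.inl h
      · exact Or.inr (Or.inl h)
      · exact Or.inr (Or.inr (fun hm => h (List.mem_cons_of_mem _ hm)))
    by_cases hij : i = j
    · subst hij
      simp only [pvInnerA, ne_eq, not_true_eq_false, ih pos h', List.countP_cons]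
      simp
    · have hmatch : ¬ (i = wild ∧ j = mutation) := by
        rintro ⟨hw, hm⟩
        rcases h with h | h | h
        · exact h hw
        · exact hij (hm ▸ h).symm
        · exact h (hm ▸ List.mem_cons_self)
      simp only [pvInnerA, ne_eq, hij, not_false_eq_true, if_pos, if_neg hmatch,
        ih (pos + 1) h', List.countP_cons]
      have hj : (j != i) = true := by simpa [bne] using fun e => hij e.symm
      simp [hj]
      ring
-- A's inner loop with i = wild, on a list whose first 'mutation' occurrence splits it as l₁ ++ mutation :: l₂
lemma pvInnerA_some (wild mutation : String) (l₁ l₂ : List String) (pos : Int)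
    (hne : mutation ≠ wild) (hml : mutation ∉ l₁) :
    pvInnerA wild wild mutation (l₁ ++ mutation :: l₂) pos
      = (some (pos + (l₁.countP (fun j => j != wild) : Nat) + 1),
         pos + (l₁.countP (fun j => j != wild) : Nat) + 1) := by
  induction l₁ generalizing pos with
  | nil =>
    simp only [List.nil_append, pvInnerA, List.countP_nil]
    rw [if_pos (show wild ≠ mutation from Ne.symm hne)]
    simp
  | cons x rest ih =>
    have hmx : mutation ≠ x := fun e => hml (e ▸ List.mem_cons_self)
    have hml' : mutation ∉ rest := fun hm => hml (List.mem_cons_of_mem _ hm)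
    by_cases hwx : wild = x
    · subst hwx
      simp only [List.cons_append, pvInnerA, ne_eq, not_true_eq_false, if_false,
        ih pos hml', List.countP_cons]
      simp
    · simp only [List.cons_append, pvInnerA, ne_eq, hwx, not_false_eq_true, if_pos,
        ih (pos + 1) hml', List.countP_cons]
      rw [if_neg (fun h => hmx h.2.symm)]
      have hx : (x != wild) = true := by simpa [bne] using fun e => hwx e.symm
      simp only [hx, if_true, Prod.mk.injEq, Option.some.injEq]
      omega
-- A returns 0 when no (wild, mutation) transition exists
lemma pvOuterA_zero (wild mutation : String) (bps outer : List String) (pos : Int)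
    (h : wild = mutation ∨ mutation ∉ bps ∨ wild ∉ outer) :
    pvOuterA wild mutation bps outer pos = 0 := by
  induction outer generalizing pos with
  | nil => simp [pvOuterA]
  | cons i rest ih =>
    have hi : i ≠ wild ∨ mutation = i ∨ mutation ∉ bps := by
      rcases h with h | h | h
      · by_cases hiw : i = wild
        · exact Or.inr (Or.inl (hiw ▸ h.symm))
        · exact Or.inl hiw
      · exact Or.inr (Or.inr h)
      · exact Or.inl (fun e => h (e ▸ List.mem_cons_self))
    have h' : wild = mutation ∨ mutation ∉ bps ∨ wild ∉ rest := by
      rcases h with h | h | h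
      · exact Or.inl h
      · exact Or.inr (Or.inl h)
      · exact Or.inr (Or.inr (fun hm => h (List.mem_cons_of_mem _ hm)))
    rw [pvOuterA, pvInnerA_none i wild mutation bps pos hi]
    exact ih _ h'
-- A's result when the outer list splits at the first wild and bps at the first mutation
lemma pvOuterA_found (wild mutation : String) (bps o₁ o₂ l₁ l₂ : List String) (pos : Int)
    (hne : mutation ≠ wild) (hwo : wild ∉ o₁) (hml : mutation ∉ l₁)
    (hbps : bps = l₁ ++ mutation :: l₂) :
    pvOuterA wild mutation bps (o₁ ++ wild :: o₂) pos
      = pos + (o₁.map (fun i => ((bps.countP (fun j => j != i) : Nat) : Int))).sum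
          + (l₁.countP (fun j => j != wild) : Nat) + 1 := by
  induction o₁ generalizing pos with
  | nil =>
    subst hbps
    simp only [List.nil_append, pvOuterA, List.map_nil, List.sum_nil, add_zero]
    rw [pvInnerA_some wild mutation l₁ l₂ pos hne hml]
  | cons x rest ih =>
    have hxw : x ≠ wild := fun e => hwo (e ▸ List.mem_cons_self)
    have hwo' : wild ∉ rest := fun hm => hwo (List.mem_cons_of_mem _ hm)
    rw [List.cons_append, pvOuterA, pvInnerA_none x wild mutation bps pos (Or.inl hxw)]
    dsimp only
    rw [ih _ hwo']
    simp only [List.map_cons, List.sum_cons]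
    ring
-- first-occurrence split of a list at a member, with the idxOf? value
lemma pv_first_split {α : Type} [BEq α] [LawfulBEq α] (a : α) (l : List α) (h : a ∈ l) :
    ∃ s t, l = s ++ a :: t ∧ a ∉ s ∧ List.idxOf? a l = some s.length := by
  induction l with
  | nil => cases h
  | cons x rest ih =>
    by_cases hxa : x = a
    · exact ⟨[], rest, by simp [hxa], by simp, by simp [List.idxOf?_cons, hxa]⟩
    · have hmem : a ∈ rest := by
        rcases List.mem_cons.mp h with h' | h'
        · exact absurd h'.symm hxa
        · exact h'
      obtain ⟨s, t, hl, hns, hidx⟩ := ih hmem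
      have hax : ¬ a = x := fun e => hxa (Eq.symm e)
      exact ⟨x :: s, t, by simp [hl], by simp [hns, hax],
        by simp [List.idxOf?_cons, hxa, hidx]⟩
-- n - (number of occurrences of i) = number of elements ≠ i
lemma pv_cntNe (l : List String) (i : String) :
    l.countP (fun j => j != i) + l.count i = l.length := by
  have h1 := List.length_eq_countP_add_countP (l := l) (p := fun j => j == i)
  have h2 : l.countP (fun a => decide (¬(a == i) = true)) = l.countP (fun j => j != i) :=
    List.countP_congr (by intro a _; simp [bne])
  simp only [List.count] at *
  omega
-- the counter loop of B is PySem's counter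
lemma pv_counts_eq (bps : List String) :
    bps.foldl (fun d bp => d.insert bp (d.getD bp 0 + 1)) PySem.Dict.empty
      = PySem.Dict.counter bps := rfl
-- evaluation of B in the found case
lemma pv_alt_found (bps o₁ o₂ l₁ l₂ : List String) (wild mutation : String)
    (hg : ¬ (wild = mutation ∨ wild ∉ bps ∨ mutation ∉ bps))
    (hbo : bps = o₁ ++ wild :: o₂) (hio : List.idxOf? wild bps = some o₁.length)
    (hbl : bps = l₁ ++ mutation :: l₂) (hil : List.idxOf? mutation bps = some l₁.length) :
    mutation_type_dna_alt bps wild mutation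
      = (o₁.map (fun bp => (bps.length : Int) - (bps.count bp : Nat))).sum
          + (l₁.countP (fun j => j != wild) : Nat) + 1 := by
  rw [mutation_type_dna_alt, if_neg hg]
  simp only [PySem.List.index?, hio, hil, Option.getD_some, pv_counts_eq]
  rw [PySem.List.slice_to bps (by positivity), PySem.List.slice_to bps (by positivity)]
  simp only [Int.toNat_natCast]
  have ht1 : bps.take o₁.length = o₁ := by rw [hbo]; exact List.take_left ..
  have ht2 : bps.take l₁.length = l₁ := by rw [hbl]; exact List.take_left ..
  rw [ht1, ht2]
  have hmap : o₁.map (fun bp => ((bps.length : Int)) - (PySem.Dict.counter bps).getD bp 0)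
      = o₁.map (fun bp => (bps.length : Int) - (bps.count bp : Nat)) :=
    List.map_congr_left (fun bp _ => by rw [PySem.Dict.getD_counter])
  rw [hmap]

-- ===== VERDICT (by name: the statement is the Claim_ definition above) =====
theorem mutation_type_dna_spec : Claim_equal_mutation_type_dna := by
  intro bps wild mutation _
  unfold Spec_mutation_type_dna
  by_cases hg : wild = mutation ∨ wild ∉ bps ∨ mutation ∉ bps
  · rw [mutation_type_dna_alt, if_pos hg, mutation_type_dna]
    apply pvOuterA_zero
    rcases hg with h | h | h
    · exact Or.inl h
    · exact Or.inr (Or.inr h)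
    · exact Or.inr (Or.inl h)
  · push_neg at hg
    obtain ⟨hwm, hw, hm⟩ := hg
    obtain ⟨o₁, o₂, hbo, hwo, hio⟩ := pv_first_split wild bps hw
    obtain ⟨l₁, l₂, hbl, hml, hil⟩ := pv_first_split mutation bps hm
    have hA := pvOuterA_found wild mutation bps o₁ o₂ l₁ l₂ 0 (Ne.symm hwm) hwo hml hbl
    rw [← hbo] at hA
    rw [mutation_type_dna, hA,
      pv_alt_found bps o₁ o₂ l₁ l₂ wild mutation (by push_neg; exact ⟨hwm, hw, hm⟩) hbo hio hbl hil]
    have hmap : ∀ i ∈ o₁, ((bps.countP (fun j => j != i) : Nat) : Int)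
        = (bps.length : Int) - (bps.count i : Nat) := by
      intro i _
      have := pv_cntNe bps i
      omega
    rw [List.map_congr_left hmap]
    ring
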